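-- pv_equiv track=rewrite | github.com/Chernoplodich/fantik | src/app/domain/fanfics/services/paginator.py | _build_cut_points
-- ===== SOURCE A (Python) =====
-- _PRI_PARAGRAPH = 100
--
-- _PRI_LINEBREAK = 50
--
-- _PRI_SENTENCE = 20
--
-- _PRI_SPACE = 1
--
-- def _build_cut_points(text: str) -> list[tuple[int, int]]:
--     """Вернуть список (u16_position, priority), отсортированный по позиции.
--
--     Позиция — сразу ПОСЛЕ делимитера; текущая страница оканчивается на делимитер,
--     следующая начинается с первого символа сразу за ним. Если одна позиция
--     удовлетворяет нескольким правилам, берётся максимальный приоритет.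
--     """
--     if not text:
--         return []
--
--     # word accumulate char-по-char, tracking u16 running position.
--     u16 = 0
--     # Для быстрого поиска приоритетов по позиции используем dict[pos → max_pri].
--     by_pos: dict[int, int] = {}
--
--     n = len(text)
--     # Используем two-char окно: char at i и char at i-1 (для \n\n и ". ").
--     for i in range(n):
--         ch = text[i]
--         # advance u16 by size of ch
--         u16 += 2 if ord(ch) > 0xFFFF else 1
--
--         # Позиция "после ch" — это u16 сейчас.
--         pos = u16
--         prev = text[i - 1] if i >= 1 else ""
--
--         pri = 0
--         if ch == "\n":
--             # \n\n имеет приоритет 100, одиночный \n — 50.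
--             pri = _PRI_PARAGRAPH if prev == "\n" else _PRI_LINEBREAK
--         elif ch == " " and prev in (".", "!", "?"):
--             pri = _PRI_SENTENCE
--         elif ch == " ":
--             pri = _PRI_SPACE
--
--         if pri:
--             # Максимум, если несколько правил (например, "\n" после "\n" даст 100,
--             # и первый "\n" отдельно — 50, на разных позициях).
--             cur = by_pos.get(pos, 0)
--             if pri > cur:
--                 by_pos[pos] = pri
--
--     return sorted(by_pos.items())
-- ===== SOURCE B (Python) =====
-- _PRI_PARAGRAPH = 100
--
-- _PRI_LINEBREAK = 50
--
-- _PRI_SENTENCE = 20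
--
-- _PRI_SPACE = 1
--
--
-- def _build_cut_points(text: str) -> list[tuple[int, int]]:
--     """Staged passes instead of one classify loop.
--
--     Pass 1 builds a prefix table of cumulative u16 widths.  Then newlines and
--     spaces are collected in two separate filtered scans (each classified via
--     the one-character slice text[i-1:i], which is "" at i == 0), the two
--     per-kind lists are merged by sorting on the character index, and finally
--     the indices are translated to u16 positions through the prefix table.
--     """
--     prefix = [0]
--     for c in text:
--         prefix.append(prefix[-1] + (2 if ord(c) > 0xFFFF else 1))
--     nl = [(i, _PRI_PARAGRAPH if text[i - 1:i] == "\n" else _PRI_LINEBREAK)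
--           for i, c in enumerate(text) if c == "\n"]
--     sp = [(i, _PRI_SENTENCE if text[i - 1:i] in (".", "!", "?") else _PRI_SPACE)
--           for i, c in enumerate(text) if c == " "]
--     return [(prefix[i + 1], p) for i, p in sorted(nl + sp)]
-- ===== Notes on version B (the rewrite author's own statement) =====
-- stated objective: alternative
-- what changed: B replaces A's single per-character classify loop with running u16 counter and dict-with-max-merge by staged passes: a precomputed prefix table of cumulative u16 widths, two separate filtered scans that collect newline and space cut points per delimiter kind (classifying via the one-character slice text[i-1:i]), a sort that merges the two per-kind lists by character index, and a final translation of indices to u16 positions through the prefix table.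
import Mathlib
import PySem

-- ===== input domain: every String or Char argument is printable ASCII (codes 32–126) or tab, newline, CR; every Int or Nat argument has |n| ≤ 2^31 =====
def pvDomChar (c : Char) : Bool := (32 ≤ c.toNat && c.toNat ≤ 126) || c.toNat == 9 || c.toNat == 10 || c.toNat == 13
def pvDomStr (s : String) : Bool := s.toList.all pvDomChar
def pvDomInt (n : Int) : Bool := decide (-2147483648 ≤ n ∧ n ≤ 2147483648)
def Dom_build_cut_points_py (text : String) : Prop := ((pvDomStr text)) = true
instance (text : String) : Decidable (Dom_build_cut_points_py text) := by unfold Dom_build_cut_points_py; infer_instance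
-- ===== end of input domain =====

-- B restructures A's single classify loop (running counter + dict-with-max-merge + sort of items)
-- into staged passes: a prefix table of u16 widths, two per-delimiter filtered scans, a merging
-- sort by character index, and a final index→u16 translation: an alternative decomposition.

-- ===== PORT A =====
-- A's per-index step: advance u16 by the char width, classify, max-merge into the dict.
-- (prev = text[i-1] if i >= 1 else "" is modelled as Option Char: "" is none.)
def pvStepA (chars : List Char) (st : Int × PySem.Dict Int Int) (i : Int) : Int × PySem.Dict Int Int :=
  let ch := PySem.List.pyGetD chars i ' '
  let u16 := st.1 + (if (ch.toNat : Int) > 0xFFFF then 2 else 1)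
  let pos := u16
  let prev : Option Char := if 1 ≤ i then some (PySem.List.pyGetD chars (i - 1) ' ') else none
  let pri : Int :=
    if ch = '\n' then (if prev = some '\n' then 100 else 50)
    else if ch = ' ' ∧ (prev = some '.' ∨ prev = some '!' ∨ prev = some '?') then 20
    else if ch = ' ' then 1
    else 0
  if pri ≠ 0 then
    let cur := st.2.getD pos 0
    if pri > cur then (u16, st.2.insert pos pri) else (u16, st.2)
  else (u16, st.2)

def build_cut_points_py (text : String) : List (Int × Int) :=
  if text.toList = [] then []
  else
    let chars := text.toList
    let n : Int := (chars.length : Int)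
    let st := (PySem.List.pyRange 0 n 1).foldl (pvStepA chars) (0, PySem.Dict.empty)
    -- sorted(by_pos.items()): dict keys are unique, so Python's tuple comparison never
    -- reaches the second component — sorting by the first component is exact here.
    PySem.List.sorted st.2.items (fun p => p.1) false

-- ===== PORT B =====
-- Source B's pass 1: prefix.append(prefix[-1] + (2 if ord(c) > 0xFFFF else 1))
def pvPrefixStep (acc : List Int) (c : Char) : List Int :=
  acc ++ [PySem.List.pyGetD acc (-1) 0 + (if (c.toNat : Int) > 0xFFFF then 2 else 1)]

def build_cut_points_py_alt (text : String) : List (Int × Int) :=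
  let chars := text.toList
  let pre := chars.foldl pvPrefixStep [(0 : Int)]
  let nl := ((PySem.List.enumerate chars 0).filter (fun p => p.2 == '\n')).map
    (fun p => (p.1, if PySem.List.slice chars (some (p.1 - 1)) (some p.1) = ['\n']
                    then (100 : Int) else 50))
  let sp := ((PySem.List.enumerate chars 0).filter (fun p => p.2 == ' ')).map
    (fun p => (p.1, if PySem.List.slice chars (some (p.1 - 1)) (some p.1) = ['.']
                    ∨ PySem.List.slice chars (some (p.1 - 1)) (some p.1) = ['!']
                    ∨ PySem.List.slice chars (some (p.1 - 1)) (some p.1) = ['?']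
                    then (20 : Int) else 1))
  -- sorted(nl + sp): character indices are distinct across the two lists ('\n' vs ' '
  -- positions never coincide), so Python's tuple comparison never reaches the second
  -- component — sorting by the index alone is exact here.
  (PySem.List.sorted (nl ++ sp) (fun p => p.1) false).map
    (fun p => (PySem.List.pyGetD pre (p.1 + 1) 0, p.2))

-- ===== PRECONDITION & SPEC =====
def Spec_build_cut_points_py (text : String) (out : List (Int × Int)) : Prop := out = build_cut_points_py_alt text
instance (text : String) (out : List (Int × Int)) : Decidable (Spec_build_cut_points_py text out) := by unfold Spec_build_cut_points_py; infer_instance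

-- ===== CLAIM (what is proved, stated in full; the proofs are below) =====
def Claim_equal_build_cut_points_py : Prop := ∀ (text : String), Dom_build_cut_points_py text → Spec_build_cut_points_py text (build_cut_points_py text)

-- ===== LEMMAS AND PROOFS =====

-- width of one char, total width of a list
def pvW (c : Char) : Int := if (c.toNat : Int) > 0xFFFF then 2 else 1

def pvWs (cs : List Char) : Int := (cs.map pvW).sum

def pvPri (prev : Option Char) (c : Char) : Int :=
  if c = '\n' then (if prev = some '\n' then 100 else 50)
  else if c = ' ' ∧ (prev = some '.' ∨ prev = some '!' ∨ prev = some '?') then 20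
  else if c = ' ' then 1
  else 0

-- the reference emission list: forward scan carrying (prev, pos)
def pvGo (prev : Option Char) (pos : Int) : List Char → List (Int × Int)
  | [] => []
  | c :: cs =>
      (if pvPri prev c ≠ 0 then [(pos + pvW c, pvPri prev c)] else []) ++ pvGo (some c) (pos + pvW c) cs

-- the prev value after scanning cs starting from prev
def pvPrevAfter (prev : Option Char) (cs : List Char) : Option Char :=
  match cs.getLast? with
  | some x => some x
  | none => prev

theorem pvW_pos (c : Char) : 1 ≤ pvW c := by
  unfold pvW; split <;> omega

theorem pvWs_nonneg (cs : List Char) : 0 ≤ pvWs cs := by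
  induction cs with
  | nil => simp [pvWs]
  | cons c cs ih =>
      have := pvW_pos c
      simp only [pvWs, List.map_cons, List.sum_cons] at *
      omega

theorem pvWs_append (cs : List Char) (c : Char) : pvWs (cs ++ [c]) = pvWs cs + pvW c := by
  simp [pvWs]

theorem pvPri_nonneg (prev : Option Char) (c : Char) : 0 ≤ pvPri prev c := by
  unfold pvPri; split_ifs <;> omega

theorem pvPrevAfter_append (prev : Option Char) (cs : List Char) (c : Char) :
    pvPrevAfter prev (cs ++ [c]) = some c := by
  simp [pvPrevAfter]

theorem pvGo_bounds (prev : Option Char) (pos : Int) (cs : List Char) :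
    ∀ p ∈ pvGo prev pos cs, pos < p.1 ∧ p.1 ≤ pos + pvWs cs := by
  induction cs generalizing prev pos with
  | nil => simp [pvGo]
  | cons c cs ih =>
      intro p hp
      have hw := pvW_pos c
      have hws := pvWs_nonneg cs
      simp only [pvGo, List.mem_append] at hp
      have hsum : pvWs (c :: cs) = pvW c + pvWs cs := by simp [pvWs]
      rcases hp with hp | hp
      · split at hp <;> simp at hp
        rcases hp with ⟨h1, _⟩
        omega
      · have := ih (some c) (pos + pvW c) p hp
        omega

theorem pvGo_pairwise (prev : Option Char) (pos : Int) (cs : List Char) :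
    (pvGo prev pos cs).Pairwise (fun a b => a.1 < b.1) := by
  induction cs generalizing prev pos with
  | nil => simp [pvGo]
  | cons c cs ih =>
      simp only [pvGo]
      refine List.pairwise_append.mpr ⟨?_, ih _ _, ?_⟩
      · split <;> simp
      · intro a ha b hb
        have hb1 := (pvGo_bounds (some c) (pos + pvW c) cs b hb).1
        split at ha <;> simp at ha
        rw [ha]
        exact hb1

theorem pvGo_append (prev : Option Char) (pos : Int) (cs : List Char) (c : Char) :
    pvGo prev pos (cs ++ [c]) =
      pvGo prev pos cs ++
        (if pvPri (pvPrevAfter prev cs) c ≠ 0 then [(pos + pvWs cs + pvW c, pvPri (pvPrevAfter prev cs) c)] else []) := by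
  induction cs generalizing prev pos with
  | nil => simp [pvGo, pvPrevAfter, pvWs]
  | cons d cs ih =>
      simp only [List.cons_append, pvGo, ih]
      have h1 : pvPrevAfter prev (d :: cs) = pvPrevAfter (some d) cs := by
        cases cs with
        | nil => rfl
        | cons e cs =>
            unfold pvPrevAfter
            rw [List.getLast?_cons_cons]
            cases hl : (e :: cs).getLast? with
            | none => simp at hl
            | some x => rfl
      have h2 : pvWs (d :: cs) = pvW d + pvWs cs := by simp [pvWs]
      rw [h1, h2, List.append_assoc]
      ring_nf

-- ===== A-side: the fold over range equals (pvWs, Dict.mk (pvGo none 0 chars)) =====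

theorem pvStepA_congr (cs : List Char) (c : Char) (st : Int × PySem.Dict Int Int) (i : Int)
    (h0 : 0 ≤ i) (h1 : i < (cs.length : Int)) :
    pvStepA (cs ++ [c]) st i = pvStepA cs st i := by
  unfold pvStepA
  have hi : PySem.List.pyGetD (cs ++ [c]) i ' ' = PySem.List.pyGetD cs i ' ' := by
    rw [PySem.List.pyGetD_eq_getElem _ _ h0 (by simp; omega),
        PySem.List.pyGetD_eq_getElem _ _ h0 (by simpa using h1)]
    rw [List.getElem_append_left (by omega)]
  rw [hi]
  by_cases hone : 1 ≤ i
  · have him : PySem.List.pyGetD (cs ++ [c]) (i - 1) ' ' = PySem.List.pyGetD cs (i - 1) ' ' := by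
      rw [PySem.List.pyGetD_eq_getElem _ _ (by omega) (by simp; omega),
          PySem.List.pyGetD_eq_getElem _ _ (by omega) (by omega)]
      rw [List.getElem_append_left (by omega)]
    simp [hone, him]
  · simp [hone]

theorem pvFoldA (cs : List Char) :
    (PySem.List.pyRange 0 (cs.length : Int) 1).foldl (pvStepA cs) (0, PySem.Dict.empty)
      = (pvWs cs, PySem.Dict.mk (pvGo none 0 cs)) := by
  induction cs using List.reverseRecOn with
  | nil => simp [PySem.List.pyRange_one_eq_nil, pvWs, pvGo]; rfl
  | append_singleton cs c ih =>
      have hlen : ((cs ++ [c]).length : Int) = (cs.length : Int) + 1 := by simp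
      rw [hlen, PySem.List.pyRange_one_succ_right (Int.natCast_nonneg _), List.foldl_append]
      have hcongr : (PySem.List.pyRange 0 (cs.length : Int) 1).foldl (pvStepA (cs ++ [c])) (0, PySem.Dict.empty)
          = (PySem.List.pyRange 0 (cs.length : Int) 1).foldl (pvStepA cs) (0, PySem.Dict.empty) := by
        apply PySem.List.foldl_congr_mem
        intro st i hi
        rw [PySem.List.mem_pyRange_one] at hi
        exact pvStepA_congr cs c st i hi.1 hi.2
      rw [hcongr, ih]
      -- now the single last step at index cs.length
      simp only [List.foldl_cons, List.foldl_nil]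
      unfold pvStepA
      have hch : PySem.List.pyGetD (cs ++ [c]) (cs.length : Int) ' ' = c := by
        rw [PySem.List.pyGetD_eq_getElem _ _ (Int.natCast_nonneg _) (by simp)]
        simp
      have hprev : (if 1 ≤ (cs.length : Int) then
            some (PySem.List.pyGetD (cs ++ [c]) ((cs.length : Int) - 1) ' ') else none)
          = pvPrevAfter none cs := by
        cases cs using List.reverseRecOn with
        | nil => simp [pvPrevAfter]
        | append_singleton ds d =>
            have h1 : (1:Int) ≤ ((ds ++ [d]).length : Int) := by simp
            rw [if_pos h1, pvPrevAfter_append]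
            have hidx : ((ds ++ [d]).length : Int) - 1 = (ds.length : Int) := by simp
            rw [hidx]
            congr 1
            rw [PySem.List.pyGetD_eq_getElem _ _ (Int.natCast_nonneg _)
              (by simp only [List.length_append, List.length_cons, List.length_nil]; push_cast; omega)]
            simp
      rw [hch, hprev]
      have hpri : (if c = '\n' then (if pvPrevAfter none cs = some '\n' then (100:Int) else 50)
          else if c = ' ' ∧ (pvPrevAfter none cs = some '.' ∨ pvPrevAfter none cs = some '!' ∨ pvPrevAfter none cs = some '?') then 20
          else if c = ' ' then 1 else 0) = pvPri (pvPrevAfter none cs) c := rfl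
      simp only [hpri]
      rw [show (if (c.toNat : Int) > 65535 then (2:Int) else 1) = pvW c from rfl]
      by_cases hz : pvPri (pvPrevAfter none cs) c ≠ 0
      · have hpos : 0 < pvPri (pvPrevAfter none cs) c := by
          have := pvPri_nonneg (pvPrevAfter none cs) c; omega
        -- the new key pvWs cs + pvW c is fresh: every existing key ≤ pvWs cs
        have hfresh : (PySem.Dict.mk (pvGo none 0 cs)).contains (pvWs cs + pvW c) = false := by
          rw [PySem.Dict.contains_eq_decide_mem_keys]
          simp only [decide_eq_false_iff_not]
          intro hmem
          simp only [PySem.Dict.keys] at hmem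
          rcases List.mem_map.mp hmem with ⟨p, hp, heq⟩
          have hb := (pvGo_bounds none 0 cs p hp).2
          have := pvW_pos c
          omega
        have hget : (PySem.Dict.mk (pvGo none 0 cs)).getD (pvWs cs + pvW c) 0 = 0 :=
          PySem.Dict.getD_of_not_contains _ _ hfresh
        rw [if_pos hz, hget,
          if_pos (show pvPri (pvPrevAfter none cs) c > 0 from hpos),
          pvWs_append, pvGo_append, if_pos hz]
        refine Prod.ext rfl ?_
        apply PySem.Dict.ext
        simp [PySem.Dict.items_insert_of_not_contains _ _ hfresh]
      · rw [if_neg hz, pvWs_append, pvGo_append, if_neg hz]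
        refine Prod.ext rfl (by simp)

-- sorted of pvGo is pvGo itself (strictly increasing positions)
theorem pvSorted_go (cs : List Char) :
    PySem.List.sorted (pvGo none 0 cs) (fun p => p.1) false = pvGo none 0 cs := by
  apply PySem.List.sorted_eq_self_of_pairwise
  exact (pvGo_pairwise none 0 cs).imp (fun h => le_of_lt h)

-- ===== B-side =====

-- the prefix table is the list of partial width sums
def pvPrefixList (cs : List Char) : List Int :=
  (List.range (cs.length + 1)).map (fun k => pvWs (cs.take k))

theorem pvPrefix_eq (cs : List Char) :
    cs.foldl pvPrefixStep [(0 : Int)] = pvPrefixList cs := by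
  induction cs using List.reverseRecOn with
  | nil => simp [pvPrefixList, pvWs]
  | append_singleton cs c ih =>
      rw [List.foldl_append, ih]
      simp only [List.foldl_cons, List.foldl_nil]
      have hsplit : pvPrefixList cs
          = (List.range cs.length).map (fun k => pvWs (cs.take k)) ++ [pvWs cs] := by
        unfold pvPrefixList
        rw [List.range_succ, List.map_append]
        simp
      have hlast : PySem.List.pyGetD (pvPrefixList cs) (-1) 0 = pvWs cs := by
        rw [hsplit, PySem.List.pyGetD_neg_one_append_singleton]
      unfold pvPrefixStep
      rw [hlast]
      have hrhs : pvPrefixList (cs ++ [c]) = pvPrefixList cs ++ [pvWs cs + pvW c] := by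
        unfold pvPrefixList
        have hlen : (cs ++ [c]).length + 1 = (cs.length + 1) + 1 := by simp
        rw [hlen, List.range_succ, List.map_append]
        congr 1
        · apply List.map_congr_left
          intro k hk
          rw [List.mem_range] at hk
          rw [List.take_append_of_le_length (by omega)]
        · simp only [List.map_cons, List.map_nil]
          rw [List.take_of_length_le (by simp), pvWs_append]
      rw [hrhs]
      rfl

-- B's one-char slice: [] at index 0, [cs[k-1]] for 1 ≤ k ≤ len
theorem pvSlice_zero (cs : List Char) :
    PySem.List.slice cs (some (-1 : Int)) (some (0 : Int)) = [] := by
  simp [PySem.List.slice]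

theorem pvSlice_one (cs : List Char) (k : Nat) (h1 : 1 ≤ k) (h2 : k ≤ cs.length) :
    PySem.List.slice cs (some ((k : Int) - 1)) (some (k : Int)) = [cs[k - 1]'(by omega)] := by
  have hcast : ((k : Int) - 1) = ((k - 1 : Nat) : Int) := by omega
  rw [hcast, PySem.List.slice_natCast]
  have hk : k - (k - 1) = 1 := by omega
  rw [hk, List.take_one, List.head?_drop, List.getElem?_eq_getElem (by omega)]
  rfl

-- B's per-index priority (the bodies of the nl/sp comprehensions, combined on the char)
def pvPriB (cs : List Char) (i : Int) (c : Char) : Int :=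
  if c = '\n' then
    (if PySem.List.slice cs (some (i - 1)) (some i) = ['\n'] then 100 else 50)
  else
    (if PySem.List.slice cs (some (i - 1)) (some i) = ['.']
      ∨ PySem.List.slice cs (some (i - 1)) (some i) = ['!']
      ∨ PySem.List.slice cs (some (i - 1)) (some i) = ['?'] then 20 else 1)

def pvG (cs : List Char) (p : Int × Char) : Int × Int :=
  (pvWs (cs.take (p.1.toNat + 1)), pvPriB cs p.1 p.2)

def pvDelim (p : Int × Char) : Bool := p.2 == '\n' || p.2 == ' '

-- disjoint filters concatenated are a permutation of the combined filter
theorem pvFilter_disjoint_perm {α : Type} (p q : α → Bool) (h : ∀ x, p x = true → q x = false)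
    (xs : List α) :
    (xs.filter p ++ xs.filter q).Perm (xs.filter (fun x => p x || q x)) := by
  induction xs with
  | nil => simp
  | cons x xs ih =>
      by_cases hp : p x = true
      · have hq := h x hp
        simp only [List.filter_cons, hp, hq, Bool.true_or, if_pos, List.cons_append,
          Bool.false_eq_true, if_neg, not_false_iff]
        exact ih.cons x
      · by_cases hq : q x = true
        · simp only [List.filter_cons, hp, hq, Bool.false_or, if_pos, if_neg, Bool.false_eq_true,
            not_false_iff]
          exact (List.perm_middle).trans (ih.cons x)
        · simp only [List.filter_cons, hp, hq, Bool.false_or, if_neg, Bool.false_eq_true,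
            not_false_iff]
          exact ih

-- pvPriB only looks at the slice up to index k, so appending a char does not change it
theorem pvPriB_prefix (cs : List Char) (c x : Char) (k : Nat) (hk : k ≤ cs.length) :
    pvPriB (cs ++ [c]) (k : Int) x = pvPriB cs (k : Int) x := by
  have hs : PySem.List.slice (cs ++ [c]) (some ((k : Int) - 1)) (some (k : Int))
      = PySem.List.slice cs (some ((k : Int) - 1)) (some (k : Int)) := by
    rcases Nat.eq_zero_or_pos k with h0 | h1
    · subst h0
      norm_num [pvSlice_zero]
    · rw [pvSlice_one (cs ++ [c]) k h1 (by simp; omega), pvSlice_one cs k h1 hk]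
      congr 1
      exact List.getElem_append_left (by omega)
  unfold pvPriB
  rw [hs]

-- at the appended delimiter the slice-based priority agrees with A's prev-based one
theorem pvPriB_last (cs : List Char) (c : Char) (hc : c = '\n' ∨ c = ' ') :
    pvPriB (cs ++ [c]) ((cs.length : Int)) c = pvPri (pvPrevAfter none cs) c := by
  induction cs using List.reverseRecOn with
  | nil =>
      rcases hc with hc | hc <;> subst hc <;>
        simp [pvPriB, pvPri, pvPrevAfter, pvSlice_zero]
  | append_singleton ds d _ =>
      have hlen : ((ds ++ [d]).length : Int) = ((ds.length + 1 : Nat) : Int) := by simp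
      unfold pvPriB
      rw [hlen, pvSlice_one (ds ++ [d] ++ [c]) (ds.length + 1) (by omega) (by simp)]
      have helt : (ds ++ [d] ++ [c])[ds.length + 1 - 1]'(by simp) = d := by
        rw [List.getElem_append_left (by simp)]
        simp
      rw [helt, pvPrevAfter_append]
      rcases hc with hc | hc <;> subst hc <;> simp [pvPri]

-- the prefix table at index k+1 is the width of the first k+1 chars
theorem pvPrefix_get (cs : List Char) (k : Nat) (hk : k < cs.length) :
    PySem.List.pyGetD (pvPrefixList cs) ((k : Int) + 1) 0 = pvWs (cs.take (k + 1)) := by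
  have hcast : ((k : Int) + 1) = ((k + 1 : Nat) : Int) := by push_cast; ring
  rw [hcast, PySem.List.pyGetD_natCast]
  unfold pvPrefixList
  rw [List.getD_eq_getElem?_getD, List.getElem?_map, List.getElem?_range (by omega)]
  rfl

-- the main B-side characterisation: pvGo is the combined filtered/mapped enumerate
theorem pvGo_eq_B (cs : List Char) :
    pvGo none 0 cs = ((PySem.List.enumerate cs 0).filter pvDelim).map (pvG cs) := by
  induction cs using List.reverseRecOn with
  | nil => simp [pvGo, PySem.List.enumerate_nil]
  | append_singleton cs c ih =>
      rw [pvGo_append, ih, PySem.List.enumerate_append]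
      simp only [PySem.List.enumerate_cons, PySem.List.enumerate_nil, List.filter_append,
        List.map_append, zero_add]
      have hold : ((PySem.List.enumerate cs 0).filter pvDelim).map (pvG (cs ++ [c]))
          = ((PySem.List.enumerate cs 0).filter pvDelim).map (pvG cs) := by
        apply List.map_congr_left
        intro p hp
        have hpmem := List.mem_of_mem_filter hp
        rw [PySem.List.mem_enumerate_iff] at hpmem
        obtain ⟨k, hk, rfl⟩ := hpmem
        simp only [zero_add]
        unfold pvG
        have ht : ((k : Int)).toNat = k := by omega
        rw [ht]
        have htake : (cs ++ [c]).take (k + 1) = cs.take (k + 1) :=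
          List.take_append_of_le_length (by omega)
        rw [htake, pvPriB_prefix cs c _ k (by omega)]
      rw [hold]
      congr 1
      by_cases hc : c = '\n' ∨ c = ' '
      · have hdel : pvDelim ((cs.length : Int), c) = true := by
          rcases hc with hc | hc <;> simp [pvDelim, hc]
        have hnz : pvPri (pvPrevAfter none cs) c ≠ 0 := by
          unfold pvPri
          rcases hc with hc | hc <;> subst hc <;> split_ifs <;> simp_all
        rw [if_pos hnz]
        simp only [List.filter_cons, hdel, if_pos, List.filter_nil, List.map_cons, List.map_nil]
        unfold pvG
        have ht : ((cs.length : Int)).toNat = cs.length := by omega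
        rw [ht, List.take_of_length_le (by simp), pvWs_append, pvPriB_last cs c hc]
      · have hdel : pvDelim ((cs.length : Int), c) = false := by
          simp only [pvDelim, Bool.or_eq_false_iff, beq_eq_false_iff_ne]
          constructor <;> intro h <;> exact hc (by simp [h])
        have hz : pvPri (pvPrevAfter none cs) c = 0 := by
          unfold pvPri
          rw [not_or] at hc
          simp [hc.1, hc.2]
        simp [hz, hdel]

-- ===== VERDICT (by name: the statement is the Claim_ definition above) =====
theorem build_cut_points_py_spec : Claim_equal_build_cut_points_py := by
  intro text _
  show build_cut_points_py text = build_cut_points_py_alt text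
  have hA : build_cut_points_py text = pvGo none 0 text.toList := by
    unfold build_cut_points_py
    by_cases h : text.toList = []
    · simp [h, pvGo]
    · rw [if_neg h]
      show PySem.List.sorted ((PySem.List.pyRange 0 ((text.toList.length : Int)) 1).foldl
          (pvStepA text.toList) (0, PySem.Dict.empty)).2.items (fun p => p.1) false = _
      rw [pvFoldA]
      simpa [PySem.Dict.items] using pvSorted_go text.toList
  have hB : build_cut_points_py_alt text
      = (PySem.List.sorted
          ((((PySem.List.enumerate text.toList 0).filter (fun p => p.2 == '\n')).map
             (fun p => (p.1, if PySem.List.slice text.toList (some (p.1 - 1)) (some p.1) = ['\n']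
                             then (100 : Int) else 50)))
           ++ (((PySem.List.enumerate text.toList 0).filter (fun p => p.2 == ' ')).map
             (fun p => (p.1, if PySem.List.slice text.toList (some (p.1 - 1)) (some p.1) = ['.']
                             ∨ PySem.List.slice text.toList (some (p.1 - 1)) (some p.1) = ['!']
                             ∨ PySem.List.slice text.toList (some (p.1 - 1)) (some p.1) = ['?']
                             then (20 : Int) else 1))))
          (fun p => p.1) false).map
          (fun p => (PySem.List.pyGetD (text.toList.foldl pvPrefixStep [(0 : Int)]) (p.1 + 1) 0, p.2)) := rfl
  rw [hA, hB]
  have hnl : (((PySem.List.enumerate text.toList 0).filter (fun p => p.2 == '\n')).map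
        (fun p => (p.1, if PySem.List.slice text.toList (some (p.1 - 1)) (some p.1) = ['\n']
                        then (100 : Int) else 50)))
      = ((PySem.List.enumerate text.toList 0).filter (fun p => p.2 == '\n')).map
        (fun q => (q.1, pvPriB text.toList q.1 q.2)) := by
    apply List.map_congr_left
    intro q hq
    have h2 : q.2 = '\n' := by simpa using List.of_mem_filter hq
    simp [pvPriB, h2]
  have hsp : (((PySem.List.enumerate text.toList 0).filter (fun p => p.2 == ' ')).map
        (fun p => (p.1, if PySem.List.slice text.toList (some (p.1 - 1)) (some p.1) = ['.']
                        ∨ PySem.List.slice text.toList (some (p.1 - 1)) (some p.1) = ['!']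
                        ∨ PySem.List.slice text.toList (some (p.1 - 1)) (some p.1) = ['?']
                        then (20 : Int) else 1)))
      = ((PySem.List.enumerate text.toList 0).filter (fun p => p.2 == ' ')).map
        (fun q => (q.1, pvPriB text.toList q.1 q.2)) := by
    apply List.map_congr_left
    intro q hq
    have h2 : q.2 = ' ' := by simpa using List.of_mem_filter hq
    simp [pvPriB, h2]
  rw [hnl, hsp, ← List.map_append]
  have hperm : (((PySem.List.enumerate text.toList 0).filter (fun p => p.2 == '\n'))
        ++ ((PySem.List.enumerate text.toList 0).filter (fun p => p.2 == ' '))).Perm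
      ((PySem.List.enumerate text.toList 0).filter pvDelim) := by
    have h := pvFilter_disjoint_perm (fun x : Int × Char => x.2 == '\n')
      (fun x : Int × Char => x.2 == ' ')
      (fun x hx => by
        simp only [beq_iff_eq] at hx ⊢
        simp [hx])
      (PySem.List.enumerate text.toList 0)
    exact h
  have hLm : (((PySem.List.enumerate text.toList 0).filter pvDelim).map
        (fun q => (q.1, pvPriB text.toList q.1 q.2))).Perm
      (((((PySem.List.enumerate text.toList 0).filter (fun p => p.2 == '\n'))
        ++ ((PySem.List.enumerate text.toList 0).filter (fun p => p.2 == ' '))).map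
        (fun q => (q.1, pvPriB text.toList q.1 q.2)))) :=
    (hperm.map _).symm
  have hpw : (((PySem.List.enumerate text.toList 0).filter pvDelim).map
        (fun q => (q.1, pvPriB text.toList q.1 q.2))).Pairwise
      (fun a b => (fun p : Int × Int => p.1) a < (fun p : Int × Int => p.1) b) := by
    have h1 := PySem.List.pairwise_lt_enumerate text.toList (0 : Int)
    have h2 := h1.filter pvDelim
    exact h2.map _ (fun a b h => by simpa using h)
  rw [PySem.List.sorted_eq_of_perm_of_pairwise_lt _ _ _ hLm hpw]
  rw [pvGo_eq_B, List.map_map]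
  apply List.map_congr_left
  intro q hq
  have hqmem := List.mem_of_mem_filter hq
  rw [PySem.List.mem_enumerate_iff] at hqmem
  obtain ⟨k, hk, rfl⟩ := hqmem
  simp only [zero_add, Function.comp_apply]
  unfold pvG
  have ht : ((k : Int)).toNat = k := by omega
  rw [ht, pvPrefix_eq, pvPrefix_get text.toList k hk]
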